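-- pv_equiv track=rewrite | github.com/ovitrac/RAGIX | ragix_kernels/security/vuln_assess.py | _group_by_host
-- ===== SOURCE A (Python) =====
-- from typing import Any, Dict, List, Optional
--
-- SEVERITY_ORDER = {
--     "critical": 4,
--     "high": 3,
--     "medium": 2,
--     "low": 1,
--     "info": 0,
-- }
--
-- def _group_by_host(
--
--     vulnerabilities: List[Dict]
-- ) -> Dict[str, List[Dict]]:
--     """Group vulnerabilities by target host."""
--     groups = {}
--
--     for v in vulnerabilities:
--         host = v.get("host", "unknown")
--         if host not in groups:
--             groups[host] = []
--         groups[host].append(v)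
--
--     # Sort each host's vulns by severity
--     for host in groups:
--         groups[host].sort(
--             key=lambda x: -SEVERITY_ORDER.get(x.get("severity", "info"), 0)
--         )
--
--     return groups
-- ===== SOURCE B (Python) =====
-- from typing import Any, Dict, List, Optional
--
-- SEVERITY_ORDER = {
--     "critical": 4,
--     "high": 3,
--     "medium": 2,
--     "low": 1,
--     "info": 0,
-- }
--
-- def _group_by_host(vulnerabilities):
--     """Group vulnerabilities by target host (hosts in first-appearance order,
--     each group sorted by descending severity, ties in input order)."""
--     hosts = list(dict.fromkeys(v.get("host", "unknown") for v in vulnerabilities))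
--     return {
--         h: sorted(
--             (v for v in vulnerabilities if v.get("host", "unknown") == h),
--             key=lambda x: -SEVERITY_ORDER.get(x.get("severity", "info"), 0),
--         )
--         for h in hosts
--     }
-- ===== Notes on version B (the rewrite author's own statement) =====
-- stated objective: alternative
-- what changed: Replaces A's mutating dict-append grouping loop followed by an in-place sort of each group with an index-free functional pipeline: dedup the host list once, then build the result dict in one comprehension whose value for each host is sorted(filter-by-host); no dict mutation or per-key in-place sorting remains.
import Mathlib
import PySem

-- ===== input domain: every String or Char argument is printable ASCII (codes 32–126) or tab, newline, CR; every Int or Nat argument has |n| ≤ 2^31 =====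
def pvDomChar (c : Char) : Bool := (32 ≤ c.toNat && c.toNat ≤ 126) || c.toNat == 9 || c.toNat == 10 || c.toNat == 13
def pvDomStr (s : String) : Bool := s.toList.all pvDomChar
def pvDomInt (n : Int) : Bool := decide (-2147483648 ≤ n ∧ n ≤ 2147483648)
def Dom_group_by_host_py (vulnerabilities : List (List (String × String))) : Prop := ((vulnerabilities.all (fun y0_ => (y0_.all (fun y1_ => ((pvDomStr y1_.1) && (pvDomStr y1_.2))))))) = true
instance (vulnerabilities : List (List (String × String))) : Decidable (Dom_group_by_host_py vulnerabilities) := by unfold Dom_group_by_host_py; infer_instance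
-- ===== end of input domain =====

-- B replaces A's mutate-a-dict grouping loop + per-group in-place sort with a dedup of
-- the host list followed by one comprehension building sorted(filter-by-host) per host
-- (alternative decomposition, same results including dict key order).

-- shared module constant SEVERITY_ORDER and the two dict lookups both sources perform
def pvSevOrder : PySem.Dict String Int :=
  PySem.Dict.mk [("critical", 4), ("high", 3), ("medium", 2), ("low", 1), ("info", 0)]

-- -SEVERITY_ORDER.get(x.get("severity", "info"), 0)
def pvSevKey (x : List (String × String)) : Int :=
  -(pvSevOrder.getD ((PySem.Dict.mk x).getD "severity" "info") 0)

-- v.get("host", "unknown")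
def pvHostOf (v : List (String × String)) : String :=
  (PySem.Dict.mk v).getD "host" "unknown"

-- ===== PORT A =====
def group_by_host_py (vulnerabilities : List (List (String × String))) : List (String × List (List (String × String))) :=
  let groups : PySem.Dict String (List (List (String × String))) :=
    vulnerabilities.foldl (fun g v =>
      let host := pvHostOf v
      let g := if g.contains host then g else g.insert host []
      g.modify host [] (fun l => l ++ [v])) PySem.Dict.empty
  (groups.keys.foldl (fun g host =>
      g.modify host [] (fun l => PySem.List.sorted l pvSevKey false)) groups).items

-- ===== PORT B =====
def group_by_host_py_alt (vulnerabilities : List (List (String × String))) : List (String × List (List (String × String))) :=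
  (PySem.List.dedup (vulnerabilities.map pvHostOf)).map
    (fun h => (h, PySem.List.sorted (vulnerabilities.filter (fun v => pvHostOf v == h)) pvSevKey false))

-- ===== PRECONDITION & SPEC =====
def Spec_group_by_host_py (vulnerabilities : List (List (String × String))) (out : List (String × List (List (String × String)))) : Prop := out = group_by_host_py_alt vulnerabilities
instance (vulnerabilities : List (List (String × String))) (out : List (String × List (List (String × String)))) : Decidable (Spec_group_by_host_py vulnerabilities out) := by unfold Spec_group_by_host_py; infer_instance

-- ===== CLAIM (what is proved, stated in full; the proofs are below) =====
def Claim_equal_group_by_host_py : Prop := ∀ (vulnerabilities : List (List (String × String))), Dom_group_by_host_py vulnerabilities → Spec_group_by_host_py vulnerabilities (group_by_host_py vulnerabilities)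

-- ===== LEMMAS AND PROOFS =====

-- A's guarded "insert [] if absent, then append" step equals a bare modify-append.
theorem pv_step_eq (g : PySem.Dict String (List (List (String × String)))) (v : List (String × String)) :
    (if g.contains (pvHostOf v) then g else g.insert (pvHostOf v) []).modify (pvHostOf v) [] (fun l => l ++ [v])
      = g.modify (pvHostOf v) [] (fun l => l ++ [v]) := by
  by_cases h : g.contains (pvHostOf v)
  · simp [h]
  · simp only [h, if_neg, Bool.not_eq_true, PySem.Dict.modify,
      PySem.Dict.getD_insert_self, PySem.Dict.insert_insert_self]
    rw [PySem.Dict.getD_of_not_contains g [] (by simpa using h)]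

-- A's grouping loop rewritten as the canonical modify-append fold.
theorem pv_loop1_eq (vs : List (List (String × String))) :
    vs.foldl (fun g v =>
        let host := pvHostOf v
        let g := if g.contains host then g else g.insert host []
        g.modify host [] (fun l => l ++ [v])) PySem.Dict.empty
      = vs.foldl (fun g v => g.modify (pvHostOf v) [] (fun l => l ++ [v])) PySem.Dict.empty := by
  have : (fun (g : PySem.Dict String (List (List (String × String)))) v =>
        let host := pvHostOf v
        let g := if g.contains host then g else g.insert host []
        g.modify host [] (fun l => l ++ [v]))
      = (fun g v => g.modify (pvHostOf v) [] (fun l => l ++ [v])) := by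
    funext g v
    exact pv_step_eq g v
  rw [this]

-- folding modify over distinct keys all present in d rewrites exactly those entries
theorem pv_loop2_items (f : List (List (String × String)) → List (List (String × String))) :
    ∀ (ks : List String) (d : PySem.Dict String (List (List (String × String)))),
      ks.Nodup → (∀ k ∈ ks, d.contains k) → d.keys.Nodup →
      (ks.foldl (fun g h => g.modify h [] f) d).items
        = d.items.map (fun p => if p.1 ∈ ks then (p.1, f p.2) else p) := by
  intro ks
  induction ks with
  | nil => intro d _ _ _; simp
  | cons k ks ih =>
    intro d hnd hmem hkd
    have hk : d.contains k := hmem k (by simp)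
    have hitems : (d.modify k [] f).items
        = d.items.map (fun p => if p.1 = k then (k, f p.2) else p) := by
      rw [PySem.Dict.modify, PySem.Dict.items_insert_of_contains _ _ hk]
      apply List.map_congr_left
      intro p hp
      by_cases hpk : p.1 = k
      · have : d.getD k [] = p.2 := by
          have : (k, p.2) ∈ d.items := by
            have := hp; rw [← hpk]; simpa using hp
          exact PySem.Dict.getD_of_mem_items d this hkd []
        simp [hpk, this]
      · simp [hpk]
    have hkeys : (d.modify k [] f).keys = d.keys := by
      simp only [PySem.Dict.keys, hitems, List.map_map]
      apply List.map_congr_left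
      intro p _
      by_cases hpk : p.1 = k <;> simp [hpk, Function.comp]
    have hnd' : ks.Nodup := hnd.of_cons
    have hknotin : k ∉ ks := by
      exact (List.nodup_cons.mp hnd).1
    rw [List.foldl_cons, ih (d.modify k [] f) hnd'
        (by
          intro k' hk'
          rw [PySem.Dict.contains_iff_mem_keys, hkeys, ← PySem.Dict.contains_iff_mem_keys]
          exact hmem k' (by simp [hk']))
        (by rw [hkeys]; exact hkd)]
    rw [hitems, List.map_map]
    apply List.map_congr_left
    intro p _
    by_cases hpk : p.1 = k
    · simp [Function.comp, hpk, hknotin]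
    · by_cases hpks : p.1 ∈ ks <;> simp [Function.comp, hpk, hpks]

-- the grouped values: getD of the modify-append fold is the filter by host
theorem pv_getD_loop1 (vs : List (List (String × String))) (c : String) :
    (vs.foldl (fun g v => g.modify (pvHostOf v) [] (fun l => l ++ [v])) PySem.Dict.empty).getD c []
      = vs.filter (fun v => pvHostOf v == c) := by
  have h1 : vs.foldl (fun g v => g.modify (pvHostOf v) [] (fun l => l ++ [v])) PySem.Dict.empty
      = (vs.map (fun v => (pvHostOf v, v))).foldl
          (fun d p => d.modify p.1 [] (fun l => l ++ [p.2])) PySem.Dict.empty := by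
    rw [List.foldl_map]
  rw [h1, PySem.Dict.getD_foldl_modify_append, List.filter_map, List.map_map]
  simp [Function.comp_def]

-- the grouped keys: first-appearance order of the hosts
theorem pv_keys_loop1 (vs : List (List (String × String))) :
    (vs.foldl (fun g v => g.modify (pvHostOf v) [] (fun l => l ++ [v])) PySem.Dict.empty).keys
      = PySem.List.dedup (vs.map pvHostOf) := by
  have := PySem.Dict.keys_foldl_modify_key vs pvHostOf
      ([] : List (List (String × String))) (fun _ v => fun l => l ++ [v]) PySem.Dict.empty
  rw [this, PySem.List.dedup_eq_ofList]
  simp [PySem.Dict.keys, PySem.Dict.empty, PySem.Set.update_nil_left]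

theorem pv_nodup_keys_loop1 (vs : List (List (String × String))) :
    (vs.foldl (fun g v => g.modify (pvHostOf v) [] (fun l => l ++ [v])) PySem.Dict.empty).keys.Nodup := by
  exact PySem.Dict.nodup_keys_foldl_modify_key vs pvHostOf _ _ _ (by simp [PySem.Dict.keys, PySem.Dict.empty])

-- ===== VERDICT (by name: the statement is the Claim_ definition above) =====
theorem group_by_host_py_spec : Claim_equal_group_by_host_py := by
  intro vs _
  show group_by_host_py vs = group_by_host_py_alt vs
  unfold group_by_host_py group_by_host_py_alt
  rw [pv_loop1_eq]
  set d := vs.foldl (fun g v => g.modify (pvHostOf v) [] (fun l => l ++ [v])) PySem.Dict.empty with hd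
  have hnd : d.keys.Nodup := pv_nodup_keys_loop1 vs
  rw [pv_loop2_items _ d.keys d hnd (fun k hk => (PySem.Dict.contains_iff_mem_keys d k).mpr hk) hnd]
  rw [PySem.Dict.items_eq_map_keys d hnd ([] : List (List (String × String))), List.map_map]
  rw [pv_keys_loop1] at *
  apply List.map_congr_left
  intro h hmem
  have hh : h ∈ d.keys := by rw [pv_keys_loop1]; exact hmem
  simp only [Function.comp, hmem, if_pos]
  rw [hd, pv_getD_loop1]
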